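-- pv_equiv track=rewrite | github.com/josephrich98/radiology_dataset_db | tests/test_entrez.py | _doi_from_link
-- ===== SOURCE A (Python) =====
-- def _doi_from_link(link):
--     if not link:
--         return None
--
--     lower_link = link.lower().strip()
--     for prefix in ("https://doi.org/", "http://doi.org/", "doi.org/"):
--         if lower_link.startswith(prefix):
--             return lower_link[len(prefix) :]
--     return None
-- ===== SOURCE B (Python) =====
-- def _doi_from_link(link):
--     if not link:
--         return None
--
--     t = link.lower().strip()
--     idx = t.find("doi.org/")
--     if idx != -1 and t[:idx] in ("", "https://", "http://"):
--         return t[idx + len("doi.org/"):]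
--     return None
-- ===== Notes on version B (the rewrite author's own statement) =====
-- stated objective: alternative
-- what changed: Instead of testing three complete prefixes in a loop, B locates the first occurrence of 'doi.org/' with str.find and accepts it iff everything before it is an allowed scheme ('', 'https://' or 'http://').
import Mathlib
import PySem

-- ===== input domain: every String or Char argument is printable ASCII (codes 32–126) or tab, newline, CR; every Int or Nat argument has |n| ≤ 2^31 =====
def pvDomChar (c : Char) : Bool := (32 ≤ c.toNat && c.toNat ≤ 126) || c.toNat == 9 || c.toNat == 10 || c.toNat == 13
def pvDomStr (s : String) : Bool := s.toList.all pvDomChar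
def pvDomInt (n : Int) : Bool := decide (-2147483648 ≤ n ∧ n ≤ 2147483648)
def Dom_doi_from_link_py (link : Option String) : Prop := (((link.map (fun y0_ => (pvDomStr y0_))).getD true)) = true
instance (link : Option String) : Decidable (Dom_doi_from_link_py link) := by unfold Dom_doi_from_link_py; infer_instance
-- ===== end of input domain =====

-- B replaces A's loop over three complete prefixes by locating the first occurrence of
-- 'doi.org/' with str.find and accepting it iff the part before it is an allowed scheme
-- ('', 'https://' or 'http://') (objective: alternative algorithm; same return value).

-- ===== PORT A =====
-- the 'for prefix in (...)' loop: first matching prefix wins, else fall through to None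
def doiPrefixLoop (t : String) : List String → Option String
  | [] => none
  | p :: ps =>
    if PySem.Str.startswith t p then
      some (PySem.Str.slice t (some (PySem.Str.len p)) none)
    else doiPrefixLoop t ps

def doi_from_link_py (link : Option String) : Option String :=
  match link with
  | none => none
  | some l =>
    if PySem.Str.len l = 0 then none   -- 'if not link' on a present string: empty is falsy
    else
      let lower_link := PySem.Str.strip (PySem.Str.lower l)
      doiPrefixLoop lower_link ["https://doi.org/", "http://doi.org/", "doi.org/"]

-- ===== PORT B =====
def doi_from_link_py_alt (link : Option String) : Option String :=
  match link with
  | none => none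
  | some l =>
    if PySem.Str.len l = 0 then none
    else
      let t := PySem.Str.strip (PySem.Str.lower l)
      let idx := PySem.Str.find t "doi.org/"
      if idx ≠ -1 ∧ PySem.Str.slice t none (some idx) ∈ (["", "https://", "http://"] : List String) then
        some (PySem.Str.slice t (some (idx + PySem.Str.len "doi.org/")) none)
      else none

-- ===== PRECONDITION & SPEC =====
def Spec_doi_from_link_py (link : Option String) (out : Option String) : Prop := out = doi_from_link_py_alt link
instance (link : Option String) (out : Option String) : Decidable (Spec_doi_from_link_py link out) := by unfold Spec_doi_from_link_py; infer_instance

-- ===== CLAIM =====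
def Claim_equal_doi_from_link_py : Prop := ∀ (link : Option String), Dom_doi_from_link_py link → Spec_doi_from_link_py link (doi_from_link_py link)

-- ===== LEMMAS AND PROOFS =====
lemma sw_iff (t p : String) : PySem.Str.startswith t p = true ↔ p.toList <+: t.toList := by
  rw [PySem.Str.startswith_eq, PySem.Chars.startswith_iff]

lemma slice_take (t : String) (n : Nat) : PySem.Str.slice t none (some (n:Int)) = String.ofList (t.toList.take n) := by
  simp [PySem.Str.slice, PySem.Chars.slice_eq_listSlice, PySem.List.slice_to_natCast]

-- an occurrence of the pattern at position i forces u[i] = 'd'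
lemma occ_head (u : List Char) (i : Nat) (h : "doi.org/".toList <+: u.drop i) : u[i]? = some 'd' := by
  obtain ⟨r, hr⟩ := h
  have h0 : (u.drop i)[0]? = some 'd' := by rw [← hr]; rfl
  rw [List.getElem?_drop] at h0
  simpa using h0

-- find points exactly where the first occurrence is
lemma find_eq_at (u : List Char) (n : Nat) (hocc : "doi.org/".toList <+: u.drop n)
    (hmin : ∀ i < n, ¬ "doi.org/".toList <+: u.drop i) :
    PySem.Chars.find u "doi.org/".toList = (n : Int) := by
  have hinf : "doi.org/".toList <:+: u :=
    List.IsInfix.trans hocc.isInfix (List.drop_suffix n u).isInfix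
  have hnn : 0 ≤ PySem.Chars.find u "doi.org/".toList :=
    (PySem.Chars.find_nonneg_iff u "doi.org/".toList).mpr hinf
  obtain ⟨hpre, hm⟩ := PySem.Chars.find_spec (s := u) (sub := "doi.org/".toList) hnn
  set f := PySem.Chars.find u "doi.org/".toList with hf
  rcases Nat.lt_trichotomy f.toNat n with h | h | h
  · exact absurd hpre (hmin _ h)
  · omega
  · exact absurd hocc (hm n h)
set_option maxHeartbeats 1000000 in
lemma core (t : String) :
    doiPrefixLoop t ["https://doi.org/", "http://doi.org/", "doi.org/"] =
    (let idx := PySem.Str.find t "doi.org/"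
     if idx ≠ -1 ∧ PySem.Str.slice t none (some idx) ∈ (["", "https://", "http://"] : List String) then
       some (PySem.Str.slice t (some (idx + PySem.Str.len "doi.org/")) none)
     else none) := by
  simp only [doiPrefixLoop, PySem.Str.find_eq, PySem.Str.len_eq]
  set u := t.toList with hu
  by_cases h1 : "https://doi.org/".toList <+: u
  · -- find = 8, prefix before it is "https://"
    obtain ⟨v, hv⟩ := h1
    have hocc : "doi.org/".toList <+: u.drop 8 := by
      rw [← hv]; exact ⟨v, rfl⟩
    have hmin : ∀ i < 8, ¬ "doi.org/".toList <+: u.drop i := by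
      intro i hi hc
      have hd := occ_head u i hc
      rw [← hv, List.getElem?_append_left (by simp; omega)] at hd
      interval_cases i <;> simp_all
    have hfind : PySem.Chars.find u "doi.org/".toList = (8 : Int) := by
      simpa using find_eq_at u 8 hocc hmin
    have hsw : PySem.Str.startswith t "https://doi.org/" = true := (sw_iff ..).mpr ⟨v, hv.symm ▸ rfl⟩
    rw [if_pos hsw, hfind]
    have htake : PySem.Str.slice t none (some (8 : Int)) = "https://" := by
      rw [show ((8:Int) = ((8:Nat):Int)) from rfl, slice_take, ← hu, ← hv,
        List.take_append_of_le_length (by decide)]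
      decide
    rw [htake, if_pos ⟨by decide, by simp⟩]
    congr 2
  · have e1 : ¬ PySem.Str.startswith t "https://doi.org/" = true := by rw [sw_iff]; exact h1
    rw [if_neg e1]
    by_cases h2 : "http://doi.org/".toList <+: u
    · -- find = 7, prefix before it is "http://"
      obtain ⟨v, hv⟩ := h2
      have hocc : "doi.org/".toList <+: u.drop 7 := by
        rw [← hv]; exact ⟨v, rfl⟩
      have hmin : ∀ i < 7, ¬ "doi.org/".toList <+: u.drop i := by
        intro i hi hc
        have hd := occ_head u i hc
        rw [← hv, List.getElem?_append_left (by simp; omega)] at hd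
        interval_cases i <;> simp_all
      have hfind : PySem.Chars.find u "doi.org/".toList = (7 : Int) := by
        simpa using find_eq_at u 7 hocc hmin
      have hsw : PySem.Str.startswith t "http://doi.org/" = true := (sw_iff ..).mpr ⟨v, hv.symm ▸ rfl⟩
      rw [if_pos hsw, hfind]
      have htake : PySem.Str.slice t none (some (7 : Int)) = "http://" := by
        rw [show ((7:Int) = ((7:Nat):Int)) from rfl, slice_take, ← hu, ← hv,
          List.take_append_of_le_length (by decide)]
        decide
      rw [htake, if_pos ⟨by decide, by simp⟩]
      congr 2
    · have e2 : ¬ PySem.Str.startswith t "http://doi.org/" = true := by rw [sw_iff]; exact h2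
      rw [if_neg e2]
      by_cases h3 : "doi.org/".toList <+: u
      · -- find = 0, empty prefix before it
        have hocc : "doi.org/".toList <+: u.drop 0 := by simpa using h3
        have hfind : PySem.Chars.find u "doi.org/".toList = (0 : Int) := by
          simpa using find_eq_at u 0 hocc (by omega)
        have hsw : PySem.Str.startswith t "doi.org/" = true := (sw_iff ..).mpr h3
        rw [if_pos hsw, hfind]
        have htake : PySem.Str.slice t none (some (0 : Int)) = "" := by
          rw [show ((0:Int) = ((0:Nat):Int)) from rfl, slice_take]
          rfl
        rw [htake, if_pos ⟨by decide, by simp⟩]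
        congr 2
      · -- no prefix matches: both sides are None
        have e3 : ¬ PySem.Str.startswith t "doi.org/" = true := by rw [sw_iff]; exact h3
        rw [if_neg e3, if_neg]
        rintro ⟨hne, hmem⟩
        have hge := PySem.Chars.neg_one_le_find (s := u) (sub := "doi.org/".toList)
        have hnn : 0 ≤ PySem.Chars.find u "doi.org/".toList := by omega
        obtain ⟨hpre, -⟩ := PySem.Chars.find_spec (s := u) (sub := "doi.org/".toList) hnn
        set n := (PySem.Chars.find u "doi.org/".toList).toNat with hn
        have hsl : PySem.Str.slice t none (some (PySem.Chars.find u "doi.org/".toList))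
            = String.ofList (u.take n) := by
          rw [show PySem.Chars.find u "doi.org/".toList = ((n:Nat):Int) by omega, slice_take, hu]
        rw [hsl] at hmem
        obtain ⟨r, hr⟩ := hpre
        have hu2 : u = u.take n ++ ("doi.org/".toList ++ r) := by
          rw [hr, List.take_append_drop]
        have key : ∀ sch : String, String.ofList (u.take n) = sch →
            ¬ ((sch.toList ++ "doi.org/".toList) <+: u) → False := by
          intro sch hs hnp
          refine hnp ⟨r, ?_⟩
          have hts : u.take n = sch.toList := by
            have := congrArg String.toList hs; simpa using this
          rw [List.append_assoc, ← hts, ← hu2]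
        simp only [List.mem_cons, List.not_mem_nil, or_false] at hmem
        rcases hmem with h | h | h
        · exact key "" h (by simpa using h3)
        · exact key "https://" h (by
            rw [show ("https://".toList ++ "doi.org/".toList = "https://doi.org/".toList) from by decide]
            exact h1)
        · exact key "http://" h (by
            rw [show ("http://".toList ++ "doi.org/".toList = "http://doi.org/".toList) from by decide]
            exact h2)

-- ===== VERDICT =====
theorem doi_from_link_py_spec : Claim_equal_doi_from_link_py := by
  intro link _
  show doi_from_link_py link = doi_from_link_py_alt link
  cases link with
  | none => rfl
  | some l =>
    dsimp only [doi_from_link_py, doi_from_link_py_alt]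
    by_cases h : PySem.Str.len l = 0
    · rw [if_pos h, if_pos h]
    · rw [if_neg h, if_neg h]
      exact core (PySem.Str.strip (PySem.Str.lower l))
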